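-- pv_equiv track=rewrite | github.com/edwincai/matrix- | NaiveBayes_submit.py | train_and_test_data
-- ===== SOURCE A (Python) =====
-- def train_and_test_data(data_):
--     filesize = int(0.5 * len(data_))
--     # 训练集和测试集的比例为5:5
--     train_data_ = [each[0] for each in data_[:filesize]]
--     train_target_ = [each[1] for each in data_[:filesize]]
--
--     train_id_ = [each[2] for each in data_[:filesize]]
--     train_name_ = [each[3] for each in data_[:filesize]]
--
--     test_data_ = [each[0] for each in data_[filesize:]]
--     test_target_ = [each[1] for each in data_[filesize:]]
--     test_id_ = [each[2] for each in data_[filesize:]]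
--     test_name_ = [each[3] for each in data_[filesize:]]
--
--     return train_data_, train_target_, train_id_, train_name_, test_data_, test_target_, test_id_, test_name_
-- ===== SOURCE B (Python) =====
-- def train_and_test_data(data_):
--     k = len(data_) // 2  # rows still to assign to the training half
--     td, tt, ti, tn = [], [], [], []
--     sd, st, si, sn = [], [], [], []
--     for d, t, i, n in data_:
--         if k > 0:
--             k -= 1
--             td.append(d); tt.append(t); ti.append(i); tn.append(n)
--         else:
--             sd.append(d); st.append(t); si.append(i); sn.append(n)
--     return td, tt, ti, tn, sd, st, si, sn
-- ===== Notes on version B (the rewrite author's own statement) =====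
-- stated objective: alternative
-- what changed: B makes a single pass over the rows with a countdown counter and eight accumulator lists, routing each row's four fields to the train or test accumulators, instead of A's eight separate list comprehensions over re-computed slices.
import Mathlib
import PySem

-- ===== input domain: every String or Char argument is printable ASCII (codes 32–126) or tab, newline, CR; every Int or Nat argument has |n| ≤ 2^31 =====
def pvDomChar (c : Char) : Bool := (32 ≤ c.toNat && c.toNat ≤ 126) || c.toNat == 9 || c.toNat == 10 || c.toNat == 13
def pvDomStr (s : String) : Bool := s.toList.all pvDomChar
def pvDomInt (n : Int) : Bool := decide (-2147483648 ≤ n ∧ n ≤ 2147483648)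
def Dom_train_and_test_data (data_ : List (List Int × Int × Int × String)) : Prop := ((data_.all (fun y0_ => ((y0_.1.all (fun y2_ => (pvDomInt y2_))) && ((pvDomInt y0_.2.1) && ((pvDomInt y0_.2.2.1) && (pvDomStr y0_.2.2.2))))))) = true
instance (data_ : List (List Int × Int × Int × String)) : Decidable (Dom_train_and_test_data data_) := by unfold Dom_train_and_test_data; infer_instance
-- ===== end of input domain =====

-- B replaces A's eight slice-comprehensions by one pass with a countdown counter
-- and eight accumulator lists (alternative decomposition, same O(n) cost).

-- ===== PORT A =====
def train_and_test_data (data_ : List (List Int × Int × Int × String)) : List (List Int) × List Int × List Int × List String × List (List Int) × List Int × List Int × List String :=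
  let filesize : Int := (data_.length : Int) / 2      -- int(0.5*len(data_)) = len // 2 (len ≥ 0, exact)
  let train_data_ := (PySem.List.slice data_ none (some filesize)).map (fun each => each.1)
  let train_target_ := (PySem.List.slice data_ none (some filesize)).map (fun each => each.2.1)
  let train_id_ := (PySem.List.slice data_ none (some filesize)).map (fun each => each.2.2.1)
  let train_name_ := (PySem.List.slice data_ none (some filesize)).map (fun each => each.2.2.2)
  let test_data_ := (PySem.List.slice data_ (some filesize) none).map (fun each => each.1)
  let test_target_ := (PySem.List.slice data_ (some filesize) none).map (fun each => each.2.1)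
  let test_id_ := (PySem.List.slice data_ (some filesize) none).map (fun each => each.2.2.1)
  let test_name_ := (PySem.List.slice data_ (some filesize) none).map (fun each => each.2.2.2)
  (train_data_, train_target_, train_id_, train_name_, test_data_, test_target_, test_id_, test_name_)

-- ===== PORT B =====
-- the single for-loop of Source B: countdown k, eight accumulators, append at the back
def pvLoop : List (List Int × Int × Int × String) → Nat →
    (List (List Int) × List Int × List Int × List String) →
    (List (List Int) × List Int × List Int × List String) →
    List (List Int) × List Int × List Int × List String × List (List Int) × List Int × List Int × List String
  | [], _, (td, tt, ti, tn), (sd, st, si, sn) => (td, tt, ti, tn, sd, st, si, sn)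
  | (d, t, i, n) :: rest, k, (td, tt, ti, tn), (sd, st, si, sn) =>
    if k > 0 then
      pvLoop rest (k - 1) (td ++ [d], tt ++ [t], ti ++ [i], tn ++ [n]) (sd, st, si, sn)
    else
      pvLoop rest k (td, tt, ti, tn) (sd ++ [d], st ++ [t], si ++ [i], sn ++ [n])

def train_and_test_data_alt (data_ : List (List Int × Int × Int × String)) : List (List Int) × List Int × List Int × List String × List (List Int) × List Int × List Int × List String :=
  pvLoop data_ (data_.length / 2) ([], [], [], []) ([], [], [], [])

-- ===== PRECONDITION & SPEC =====
def Spec_train_and_test_data (data_ : List (List Int × Int × Int × String)) (out : List (List Int) × List Int × List Int × List String × List (List Int) × List Int × List Int × List String) : Prop := out = train_and_test_data_alt data_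
-- explicit DecidableEq term for the deep product (instance search times out on it)
def pvDecLL : DecidableEq (List (List Int)) := inferInstance
def pvDecL : DecidableEq (List Int) := inferInstance
def pvDecS : DecidableEq (List String) := inferInstance
def pvDecTuple : DecidableEq (List (List Int) × List Int × List Int × List String × List (List Int) × List Int × List Int × List String) :=
  @instDecidableEqProd _ _ pvDecLL (@instDecidableEqProd _ _ pvDecL (@instDecidableEqProd _ _ pvDecL (@instDecidableEqProd _ _ pvDecS (@instDecidableEqProd _ _ pvDecLL (@instDecidableEqProd _ _ pvDecL (@instDecidableEqProd _ _ pvDecL pvDecS))))))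
instance (data_ : List (List Int × Int × Int × String)) (out : List (List Int) × List Int × List Int × List String × List (List Int) × List Int × List Int × List String) : Decidable (Spec_train_and_test_data data_ out) := by unfold Spec_train_and_test_data; exact pvDecTuple out (train_and_test_data_alt data_)

-- ===== CLAIM (what is proved, stated in full; the proofs are below) =====
def Claim_equal_train_and_test_data : Prop := ∀ (data_ : List (List Int × Int × Int × String)), Dom_train_and_test_data data_ → Spec_train_and_test_data data_ (train_and_test_data data_)

-- ===== LEMMAS AND PROOFS =====
theorem pvLoop_eq (l : List (List Int × Int × Int × String)) :
    ∀ (k : Nat) td tt ti tn sd st si sn,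
    pvLoop l k (td, tt, ti, tn) (sd, st, si, sn) =
      (td ++ (l.take k).map (fun e => e.1), tt ++ (l.take k).map (fun e => e.2.1),
       ti ++ (l.take k).map (fun e => e.2.2.1), tn ++ (l.take k).map (fun e => e.2.2.2),
       sd ++ (l.drop k).map (fun e => e.1), st ++ (l.drop k).map (fun e => e.2.1),
       si ++ (l.drop k).map (fun e => e.2.2.1), sn ++ (l.drop k).map (fun e => e.2.2.2)) := by
  induction l with
  | nil => intros; simp [pvLoop]
  | cons h rest ih =>
    intro k td tt ti tn sd st si sn
    obtain ⟨d, t, i, n⟩ := h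
    cases k with
    | zero => simp [pvLoop, ih]
    | succ m => simp [pvLoop, ih]

-- ===== VERDICT (by name: the statement is the Claim_ definition above) =====
theorem train_and_test_data_spec : Claim_equal_train_and_test_data := by
  intro data_ _
  unfold Spec_train_and_test_data train_and_test_data train_and_test_data_alt
  have h0 : (0:Int) ≤ (data_.length : Int) / 2 := by positivity
  have ht : ((data_.length : Int) / 2).toNat = data_.length / 2 := by omega
  simp only [PySem.List.slice_to _ h0, PySem.List.slice_from _ h0, ht, pvLoop_eq]
  simp
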